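-- pv_equiv track=rewrite | github.com/rough7sea/ProblemSolving | leetcode/problems/easy/1945. Sum of Digits of String After Convert.py | getLucky
-- ===== SOURCE A (Python) =====
-- def getLucky(s: str, k: int) -> int:
--     num = ''
--     for i in range(len(s)):
--         num += f'{(ord(s[i]) - 96)}'
--     for i in range(k):
--         temp = 0
--         for n in num:
--             temp += int(n)
--         num = f'{temp}'
--     return int(num)
-- ===== SOURCE B (Python) =====
-- def getLucky(s: str, k: int) -> int:
--     if k <= 0:
--         # no reduction rounds: the result is just the concatenated digit string as an int
--         return int(''.join(str(ord(c) - 96) for c in s))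
--     total = 0
--     for c in s:
--         v = ord(c) - 96          # at most 30 for ASCII input, so two digits
--         total += v // 10 + v % 10
--     for _ in range(k - 1):
--         t = 0
--         while total > 0:
--             t += total % 10
--             total //= 10
--         total = t
--     return total
-- ===== Notes on version B (the rewrite author's own statement) =====
-- stated objective: alternative
-- what changed: B replaces A's repeated build-a-string/sum-its-characters rounds by pure integer arithmetic: one pass over the characters accumulates the first digit sum directly (v//10 + v%10 per letter, no concatenated string is ever built for k>=1), and the remaining k-1 reductions extract digits with %10 and //=10 on the integer; only the k<=0 case, where A returns the raw concatenation, builds the digit string once.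
import Mathlib
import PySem

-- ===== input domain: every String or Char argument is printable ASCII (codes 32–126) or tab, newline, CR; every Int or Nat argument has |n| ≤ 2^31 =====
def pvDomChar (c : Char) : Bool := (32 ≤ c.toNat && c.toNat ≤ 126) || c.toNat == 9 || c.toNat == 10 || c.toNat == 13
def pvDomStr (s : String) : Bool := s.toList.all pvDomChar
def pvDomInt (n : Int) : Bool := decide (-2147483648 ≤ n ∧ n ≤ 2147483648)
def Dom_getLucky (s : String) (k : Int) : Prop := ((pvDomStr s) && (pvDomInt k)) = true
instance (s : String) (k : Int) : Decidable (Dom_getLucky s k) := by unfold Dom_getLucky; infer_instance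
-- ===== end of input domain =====

-- B replaces A's string rounds by integer arithmetic (objective: alternative decomposition).

-- ===== PORT A =====
def getLucky (s : String) (k : Int) : Int :=
  let cs := s.toList
  let num0 := (PySem.List.pyRange 0 (PySem.List.len cs)).foldl
    (fun num i => num ++ PySem.Int.toChars (((PySem.List.pyGetD cs i ' ').toNat : Int) - 96)) ([] : List Char)
  let numf := (PySem.List.pyRange 0 k).foldl
    (fun num _ => PySem.Int.toChars (num.foldl (fun temp n => temp + (PySem.Int.ofChars? [n]).getD 0) 0)) num0
  (PySem.Int.ofChars? numf).getD 0

-- ===== PORT B =====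
-- the `while total > 0` loop of Source B (t accumulates the digits of total)
def pvDigitLoop (t total : Int) : Int :=
  if _h : 0 < total then pvDigitLoop (t + PySem.Int.mod total 10) (PySem.Int.floordiv total 10) else t
termination_by total.toNat
decreasing_by
  have h10 : PySem.Int.floordiv total 10 = total / 10 := PySem.Int.floordiv_eq_ediv_of_pos (by omega)
  omega

def getLucky_alt (s : String) (k : Int) : Int :=
  let cs := s.toList
  if k ≤ 0 then
    (PySem.Int.ofChars? (PySem.Chars.join [] (cs.map (fun c => PySem.Int.toChars ((c.toNat : Int) - 96))))).getD 0
  else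
    let total := cs.foldl
      (fun t c => t + (PySem.Int.floordiv ((c.toNat : Int) - 96) 10 + PySem.Int.mod ((c.toNat : Int) - 96) 10)) 0
    (PySem.List.pyRange 0 (k - 1)).foldl (fun t _ => pvDigitLoop 0 t) total

-- ===== PRECONDITION & SPEC =====
-- Pre_ is exactly where the Python A returns: for k >= 1 every character must have code >= 96
-- (otherwise the digit-sum round hits the '-' sign and int('-') raises ValueError); for k <= 0
-- the concatenation must parse as an int, i.e. s is nonempty and every character after the first
-- has code >= 96 (a ValueError otherwise).
def Pre_getLucky (s : String) (k : Int) : Prop :=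
  (1 ≤ k → (s.toList.all (fun c => 96 ≤ c.toNat)) = true) ∧
  (k ≤ 0 → s.toList ≠ [] ∧ (s.toList.tail.all (fun c => 96 ≤ c.toNat)) = true)
instance (s : String) (k : Int) : Decidable (Pre_getLucky s k) := by unfold Pre_getLucky; infer_instance

def pvWitness_getLucky : String × Int := ("abz", 2)

def Spec_getLucky (s : String) (k : Int) (out : Int) : Prop := out = getLucky_alt s k
instance (s : String) (k : Int) (out : Int) : Decidable (Spec_getLucky s k out) := by unfold Spec_getLucky; infer_instance

-- ===== CLAIM (what is proved, stated in full; the proofs are below) =====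
def Claim_equal_getLucky : Prop := ∀ (s : String) (k : Int), Dom_getLucky s k → Pre_getLucky s k → Spec_getLucky s k (getLucky s k)

-- ===== LEMMAS AND PROOFS =====

-- ---------- parser (int(...)) facts ----------

-- decimal value of a digit string, accumulated from the left (what int() computes on plain digits)
def pvDigitValue (ds : List Char) : Nat := ds.foldl (fun a c => 10 * a + (c.toNat - 48)) 0

theorem pv_notSpace_of_digit {c : Char} (h : c.isDigit = true) : PySem.Int.isIntSpace c = false := by
  simp only [PySem.Int.isIntSpace, Bool.or_eq_false_iff, decide_eq_false_iff_not]
  refine ⟨⟨⟨⟨⟨?_, ?_⟩, ?_⟩, ?_⟩, ?_⟩, ?_⟩ <;> rintro rfl <;> exact absurd h (by decide)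

-- any function satisfying the defining equations of int()'s digit scanner agrees with
-- the accumulated decimal value on all-digit input
theorem pv_goParse (go : List Char → Bool → Nat → Option Nat)
    (h1 : ∀ b acc, go [] b acc = if b = true then some acc else none)
    (h2 : ∀ c rest b acc, go (c :: rest) b acc =
      if c.isDigit = true then go rest true (acc * 10 + (c.toNat - '0'.toNat))
      else
        if c = '_' ∧ b = true then
          match rest with
          | d :: _ => if d.isDigit = true then go rest false acc else none
          | [] => none
        else none) :
    ∀ ds acc, ds.all Char.isDigit = true →
      go ds true acc = some (ds.foldl (fun a c => 10 * a + (c.toNat - 48)) acc) := by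
  intro ds
  induction ds with
  | nil => intro acc _; rw [h1]; rfl
  | cons c rest ih =>
    intro acc h
    simp only [List.all_cons, Bool.and_eq_true] at h
    rw [h2, if_pos h.1, ih _ h.2]
    simp only [List.foldl_cons]
    congr 2
    show acc * 10 + (c.toNat - 48) = 10 * acc + (c.toNat - 48)
    omega

-- helper to pull the (module-private) digit scanner of ofChars? out of a goal by unification
theorem pv_map_bind_eq (o : Option Nat) (v : Nat) (h : o = some v) :
    Option.map (fun n : Int => n)
      (Bind.bind o (fun a : Nat => @Pure.pure Option (@Applicative.toPure Option (@Monad.toApplicative Option instMonadOption)) Int (a : Int))) = some ((v : Nat) : Int) := by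
  subst h; rfl

theorem pv_parse_digits (ds : List Char) (hne : ds ≠ []) (hd : ds.all Char.isDigit = true) :
    PySem.Int.ofChars? ds = some ((pvDigitValue ds : Nat) : Int) := by
  have hstrip : ∀ t : List Char, t.all Char.isDigit = true → List.dropWhile PySem.Int.isIntSpace t = t := by
    intro t ht
    apply List.dropWhile_eq_self_iff.mpr
    intro h
    cases t with
    | nil => simp at h
    | cons a t' =>
      simp only [List.all_cons, Bool.and_eq_true] at ht
      simp [pv_notSpace_of_digit ht.1]
  simp only [PySem.Int.ofChars?]
  rw [hstrip _ hd, hstrip _ (by simpa using hd), List.reverse_reverse]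
  cases ds with
  | nil => exact absurd rfl hne
  | cons c rest =>
    simp only [List.all_cons, Bool.and_eq_true] at hd
    split
    · rename_i ds' heq
      exfalso; cases heq
      exact absurd hd.1 (by decide)
    · rename_i ds' heq
      exfalso; cases heq
      exact absurd hd.1 (by decide)
    · apply pv_map_bind_eq
      conv_lhs => whnf
      rw [hd.1]
      refine Eq.trans (pv_goParse _ ?_ ?_ rest _ hd.2) ?_
      · intro b acc; rfl
      · intro c' rest' b acc; rfl
      · simp only [Option.some.injEq, pvDigitValue, List.foldl_cons]
        congr 1

theorem pv_digit_bounds (c : Char) (h : c.isDigit = true) : 48 ≤ c.toNat ∧ c.toNat ≤ 57 := by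
  simp [Char.isDigit] at h
  obtain ⟨h1, h2⟩ := h
  simp only [Char.toNat]
  exact ⟨UInt32.le_iff_toNat_le.mp h1, UInt32.le_iff_toNat_le.mp h2⟩

theorem pv_digitChar_toNat (d : Nat) (h : d < 10) : (Nat.digitChar d).toNat = d + 48 := by
  interval_cases d <;> rfl

theorem pv_value_append (ds : List Char) (c : Char) :
    pvDigitValue (ds ++ [c]) = 10 * pvDigitValue ds + (c.toNat - 48) := by
  simp [pvDigitValue, List.foldl_append]

theorem pv_value_toDigits (m : Nat) : pvDigitValue (Nat.toDigits 10 m) = m := by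
  induction m using Nat.strong_induction_on with
  | _ m ih =>
    by_cases hm : m < 10
    · rw [Nat.toDigits_of_lt_base hm]
      simp [pvDigitValue, pv_digitChar_toNat m hm]
    · rw [Nat.toDigits_of_base_le (by norm_num) (by omega), pv_value_append,
        ih (m / 10) (by omega), pv_digitChar_toNat _ (by omega)]
      omega

theorem pv_digits_toDigits (n : Nat) : (Nat.toDigits 10 n).all Char.isDigit = true := by
  simp only [List.all_eq_true]
  intro c hc
  exact Nat.isDigit_of_mem_toDigits (by norm_num) (by norm_num) hc

theorem pv_roundtrip (n : Int) (h : 0 ≤ n) :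
    PySem.Int.ofChars? (PySem.Int.toChars n) = some n := by
  have hto : PySem.Int.toChars n = Nat.toDigits 10 n.toNat := by
    simp [PySem.Int.toChars, not_lt.mpr h]
  rw [hto, pv_parse_digits _ (by have := @Nat.length_toDigits_pos 10 n.toNat; intro he; simp [he] at this) (pv_digits_toDigits _),
    pv_value_toDigits]
  simp [Int.toNat_of_nonneg h]

theorem pv_parse_single (c : Char) (h : c.isDigit = true) :
    (PySem.Int.ofChars? [c]).getD 0 = ((c.toNat : Int) - 48) := by
  rw [pv_parse_digits [c] (by simp) (by simp [h])]
  have h48 := (pv_digit_bounds c h).1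
  simp [pvDigitValue]
  omega

-- ---------- digit sums ----------

-- the character-wise sum A's inner loop computes
def pvSDS (ds : List Char) : Int := ds.foldl (fun temp n => temp + (PySem.Int.ofChars? [n]).getD 0) 0

theorem pv_SDS_sum (ds : List Char) :
    pvSDS ds = (ds.map (fun n => (PySem.Int.ofChars? [n]).getD 0)).sum :=
  (PySem.List.foldl_add ds _ 0).trans (by ring)

theorem pv_dl_eq (t total : Int) : pvDigitLoop t total =
    if 0 < total then pvDigitLoop (t + PySem.Int.mod total 10) (PySem.Int.floordiv total 10) else t := by
  rw [pvDigitLoop]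
  split <;> rfl

theorem pv_dl_acc : ∀ (n : Nat) (t total : Int), total.toNat ≤ n →
    pvDigitLoop t total = t + pvDigitLoop 0 total := by
  intro n
  induction n with
  | zero =>
    intro t total h
    have hnp : ¬ (0 < total) := by omega
    rw [pv_dl_eq t total, pv_dl_eq 0 total, if_neg hnp, if_neg hnp]
    ring
  | succ n ih =>
    intro t total h
    by_cases hp : 0 < total
    · have hfd : PySem.Int.floordiv total 10 = total / 10 := PySem.Int.floordiv_eq_ediv_of_pos (by omega)
      have hle : (PySem.Int.floordiv total 10).toNat ≤ n := by rw [hfd]; omega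
      rw [pv_dl_eq t total, pv_dl_eq 0 total, if_pos hp, if_pos hp, ih _ _ hle]
      conv_rhs => rw [ih _ _ hle]
      ring
    · rw [pv_dl_eq t total, pv_dl_eq 0 total, if_neg hp, if_neg hp]
      ring

theorem pv_dl_step (total : Int) (h : 0 < total) :
    pvDigitLoop 0 total = PySem.Int.mod total 10 + pvDigitLoop 0 (PySem.Int.floordiv total 10) := by
  rw [pv_dl_eq 0 total, if_pos h,
    pv_dl_acc (PySem.Int.floordiv total 10).toNat _ _ le_rfl]
  ring

theorem pv_digitChar_isDigit (d : Nat) (h : d < 10) : (Nat.digitChar d).isDigit = true := by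
  interval_cases d <;> decide

theorem pv_SDS_toDigits (n : Nat) : pvSDS (Nat.toDigits 10 n) = pvDigitLoop 0 (n : Int) := by
  induction n using Nat.strong_induction_on with
  | _ n ih =>
    by_cases hn : n < 10
    · rw [Nat.toDigits_of_lt_base hn]
      rw [pv_SDS_sum]
      simp only [List.map_cons, List.map_nil, List.sum_cons, List.sum_nil]
      rw [pv_parse_single _ (pv_digitChar_isDigit n hn), pv_digitChar_toNat n hn]
      rw [pv_dl_eq]
      by_cases h0 : 0 < n
      · have hp : (0:Int) < (n:Int) := by exact_mod_cast h0
        rw [if_pos hp]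
        have hm : PySem.Int.mod (n : Int) 10 = ((n % 10 : Nat) : Int) := by
          exact_mod_cast PySem.Int.mod_natCast n 10
        have hf : PySem.Int.floordiv (n : Int) 10 = ((n / 10 : Nat) : Int) := by
          exact_mod_cast PySem.Int.floordiv_natCast n 10
        rw [hm, hf]
        have : n / 10 = 0 := by omega
        rw [this, pv_dl_eq]
        norm_num
        omega
      · have : n = 0 := by omega
        subst this
        norm_num
    · rw [Nat.toDigits_of_base_le (by norm_num) (by omega)]
      rw [pv_SDS_sum, List.map_append, List.sum_append, ← pv_SDS_sum]
      simp only [List.map_cons, List.map_nil, List.sum_cons, List.sum_nil]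
      rw [pv_parse_single _ (pv_digitChar_isDigit _ (by omega)), pv_digitChar_toNat _ (by omega)]
      rw [ih (n / 10) (by omega)]
      have hp : (0:Int) < (n:Int) := by exact_mod_cast (by omega : 0 < n)
      have hm : PySem.Int.mod (n : Int) 10 = ((n % 10 : Nat) : Int) := by
        exact_mod_cast PySem.Int.mod_natCast n 10
      have hf : PySem.Int.floordiv (n : Int) 10 = ((n / 10 : Nat) : Int) := by
        exact_mod_cast PySem.Int.floordiv_natCast n 10
      rw [pv_dl_step _ hp, hm, hf]
      push_cast
      ring

theorem pv_digitLoop_nonneg (t : Int) (h : 0 ≤ t) : 0 ≤ pvDigitLoop 0 t := by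
  have : ∀ (n : Nat) (u : Int), u.toNat ≤ n → 0 ≤ u → 0 ≤ pvDigitLoop 0 u := by
    intro n
    induction n with
    | zero =>
      intro u hle hu
      have h0 : u = 0 := by omega
      subst h0
      rw [pv_dl_eq]; norm_num
    | succ n ih =>
      intro u hle hu
      by_cases hp : 0 < u
      · rw [pv_dl_step _ hp]
        have hfd : PySem.Int.floordiv u 10 = u / 10 := PySem.Int.floordiv_eq_ediv_of_pos (by omega)
        have h1 : 0 ≤ pvDigitLoop 0 (PySem.Int.floordiv u 10) := by
          apply ih
          · rw [hfd]; omega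
          · rw [hfd]; omega
        have h2 : 0 ≤ PySem.Int.mod u 10 := PySem.Int.mod_nonneg u (by norm_num)
        omega
      · rw [pv_dl_eq, if_neg hp]
  exact this t.toNat t le_rfl h

theorem pv_SDS_toChars (t : Int) (h : 0 ≤ t) : pvSDS (PySem.Int.toChars t) = pvDigitLoop 0 t := by
  have hto : PySem.Int.toChars t = Nat.toDigits 10 t.toNat := by
    simp [PySem.Int.toChars, not_lt.mpr h]
  rw [hto, pv_SDS_toDigits, Int.toNat_of_nonneg h]

-- ---------- assembling the two ports ----------

theorem pv_join_nil (L : List (List Char)) : PySem.Chars.join [] L = L.flatten := by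
  simp only [PySem.Chars.join]
  induction L with
  | nil => rfl
  | cons a t ih =>
    cases t with
    | nil => simp [List.intercalate]
    | cons b t' =>
      simp only [List.intercalate, List.intersperse] at ih ⊢
      simp_all

theorem pv_build_eq (cs : List Char) :
    (PySem.List.pyRange 0 (PySem.List.len cs)).foldl
      (fun num i => num ++ PySem.Int.toChars (((PySem.List.pyGetD cs i ' ').toNat : Int) - 96)) ([] : List Char)
    = (cs.map (fun c => PySem.Int.toChars ((c.toNat : Int) - 96))).flatten := by
  rw [PySem.List.foldl_append_eq_flatMap]
  rw [List.nil_append, List.flatMap_def]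
  rw [show (fun i => PySem.Int.toChars (((PySem.List.pyGetD cs i ' ').toNat : Int) - 96))
      = (fun c : Char => PySem.Int.toChars ((c.toNat : Int) - 96)) ∘ (fun j => PySem.List.pyGetD cs j ' ') from rfl]
  rw [← List.map_map, PySem.List.map_pyGetD_pyRange_zero]

theorem pv_SDS_append (a b : List Char) : pvSDS (a ++ b) = pvSDS a + pvSDS b := by
  rw [pv_SDS_sum, pv_SDS_sum, pv_SDS_sum, List.map_append, List.sum_append]

theorem pv_SDS_flatten (L : List (List Char)) : pvSDS L.flatten = (L.map pvSDS).sum := by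
  induction L with
  | nil => rfl
  | cons a t ih => simp [List.flatten_cons, pv_SDS_append, ih]

theorem pv_dl_small (u : Int) (h0 : 0 ≤ u) (h10 : u < 10) : pvDigitLoop 0 u = u := by
  rw [pv_dl_eq]
  by_cases hp : 0 < u
  · rw [if_pos hp, PySem.Int.mod_eq_emod_of_pos (by norm_num), PySem.Int.floordiv_eq_ediv_of_pos (by norm_num)]
    have hm : u % 10 = u := by omega
    have hd : u / 10 = 0 := by omega
    rw [hm, hd, pv_dl_acc 0 _ 0 (by norm_num), pv_dl_eq]
    norm_num
  · rw [if_neg hp]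
    omega

theorem pv_dl_two_digits (v : Int) (h0 : 0 ≤ v) (h99 : v < 100) :
    pvDigitLoop 0 v = PySem.Int.floordiv v 10 + PySem.Int.mod v 10 := by
  by_cases hp : 0 < v
  · rw [pv_dl_step v hp]
    have he : PySem.Int.floordiv v 10 = v / 10 := PySem.Int.floordiv_eq_ediv_of_pos (by norm_num)
    rw [pv_dl_small _ (by rw [he]; omega) (by rw [he]; omega)]
    ring
  · have hv : v = 0 := by omega
    subst hv
    rw [pv_dl_eq]
    norm_num

theorem pv_char_digitsum (c : Char) (h96 : 96 ≤ c.toNat) (h126 : c.toNat ≤ 126) :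
    pvSDS (PySem.Int.toChars ((c.toNat : Int) - 96))
      = PySem.Int.floordiv ((c.toNat : Int) - 96) 10 + PySem.Int.mod ((c.toNat : Int) - 96) 10 := by
  have h0 : (0 : Int) ≤ (c.toNat : Int) - 96 := by omega
  rw [pv_SDS_toChars _ h0, pv_dl_two_digits _ h0 (by omega)]

theorem pv_foldl_range_iterate {α : Type} (f : α → α) : ∀ (n : Nat) (x : α),
    (PySem.List.pyRange 0 (n : Int)).foldl (fun a _ => f a) x = f^[n] x := by
  intro n
  induction n with
  | zero =>
    intro x
    simp [PySem.List.pyRange]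
  | succ n ih =>
    intro x
    have hcast : ((n + 1 : Nat) : Int) = (n : Int) + 1 := by push_cast; ring
    rw [hcast, PySem.List.pyRange_one_succ_right (by positivity), List.foldl_append, ih x]
    simp only [List.foldl_cons, List.foldl_nil]
    rw [Function.iterate_succ_apply']

theorem pv_iter_nonneg (S : Int) (h : 0 ≤ S) : ∀ m : Nat, 0 ≤ (fun t => pvDigitLoop 0 t)^[m] S := by
  intro m
  induction m with
  | zero => simpa
  | succ m ih => rw [Function.iterate_succ_apply']; exact pv_digitLoop_nonneg _ ih

theorem pv_chain (num0 : List Char) (hS : 0 ≤ pvSDS num0) : ∀ m : Nat,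
    (fun num : List Char => PySem.Int.toChars (pvSDS num))^[m + 1] num0
      = PySem.Int.toChars ((fun t => pvDigitLoop 0 t)^[m] (pvSDS num0)) := by
  intro m
  induction m with
  | zero => simp
  | succ m ih =>
    rw [Function.iterate_succ_apply' (n := m + 1), ih, Function.iterate_succ_apply' (n := m)]
    rw [pv_SDS_toChars _ (pv_iter_nonneg _ hS m)]

theorem getLucky_spec_aux : ∀ (s : String) (k : Int), Dom_getLucky s k → Pre_getLucky s k →
    getLucky s k = getLucky_alt s k := by
  intro s k hdom hpre
  simp only [getLucky, getLucky_alt]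
  rw [pv_build_eq]
  by_cases hk : k ≤ 0
  · rw [if_pos hk]
    have hkr : PySem.List.pyRange 0 k = [] := by
      simp only [PySem.List.pyRange]
      norm_num
      omega
    rw [hkr, List.foldl_nil, pv_join_nil]
  · rw [if_neg hk]
    -- every character code is ≥ 96 (Pre_) and ≤ 126 (Dom)
    have hchars : ∀ c ∈ s.toList, 96 ≤ c.toNat ∧ c.toNat ≤ 126 := by
      intro c hc
      have h96 : 96 ≤ c.toNat := by
        have := hpre.1 (by omega)
        simp only [List.all_eq_true, decide_eq_true_eq] at this
        exact this c hc
      refine ⟨h96, ?_⟩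
      have hd : pvDomStr s = true := by
        unfold Dom_getLucky at hdom
        simp at hdom
        exact hdom.1
      unfold pvDomStr at hd
      simp only [List.all_eq_true] at hd
      have := hd c hc
      unfold pvDomChar at this
      simp at this
      omega
    -- the first digit sum computed by the two ports agree
    have hS : pvSDS ((s.toList.map (fun c => PySem.Int.toChars ((c.toNat : Int) - 96))).flatten)
        = s.toList.foldl (fun t c => t + (PySem.Int.floordiv ((c.toNat : Int) - 96) 10 + PySem.Int.mod ((c.toNat : Int) - 96) 10)) 0 := by
      rw [pv_SDS_flatten, PySem.List.foldl_add, List.map_map]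
      rw [show (0 : Int) + _ = _ from zero_add _]
      congr 1
      apply List.map_congr_left
      intro c hc
      exact pv_char_digitsum c (hchars c hc).1 (hchars c hc).2
    -- nonnegativity of that digit sum
    have hS0 : 0 ≤ s.toList.foldl (fun t c => t + (PySem.Int.floordiv ((c.toNat : Int) - 96) 10 + PySem.Int.mod ((c.toNat : Int) - 96) 10)) 0 := by
      rw [PySem.List.foldl_add]
      rw [show (0 : Int) + _ = _ from zero_add _]
      apply List.sum_nonneg
      intro x hx
      simp only [List.mem_map] at hx
      obtain ⟨c, hc, rfl⟩ := hx
      have h96 := (hchars c hc).1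
      have hfd : PySem.Int.floordiv ((c.toNat : Int) - 96) 10 = ((c.toNat : Int) - 96) / 10 :=
        PySem.Int.floordiv_eq_ediv_of_pos (by norm_num)
      have hmd := PySem.Int.mod_nonneg ((c.toNat : Int) - 96) (b := 10) (by norm_num)
      have : (0:Int) ≤ ((c.toNat : Int) - 96) / 10 := Int.ediv_nonneg (by omega) (by norm_num)
      omega
    -- convert both loops to function iteration
    have hk1 : (1:Int) ≤ k := by omega
    have hkc : k = ((k.toNat : Nat) : Int) := by omega
    have hkc1 : k - 1 = (((k - 1).toNat : Nat) : Int) := by omega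
    conv_rhs => rw [hkc1, pv_foldl_range_iterate]
    conv_lhs => rw [hkc, pv_foldl_range_iterate]
    have hm : k.toNat = (k.toNat - 1) + 1 := by omega
    rw [hm]
    rw [show (fun num : List Char => PySem.Int.toChars (List.foldl (fun temp n => temp + (PySem.Int.ofChars? [n]).getD 0) 0 num))
        = (fun num : List Char => PySem.Int.toChars (pvSDS num)) from rfl]
    rw [pv_chain _ (by rw [hS]; exact hS0)]
    rw [pv_roundtrip _ (by rw [hS]; exact pv_iter_nonneg _ hS0 _)]
    rw [hS]
    have : (k - 1).toNat = k.toNat - 1 := by omega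
    rw [this]
    rfl

-- ===== VERDICT (by name: the statement is the Claim_ definition above) =====
theorem getLucky_spec : Claim_equal_getLucky := by
  intro s k hdom hpre
  unfold Spec_getLucky
  exact getLucky_spec_aux s k hdom hpre
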